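-- pv_equiv track=rewrite | github.com/kaori-killer/BAEKJOON-SUMMER-CHALLENGE | CHAPTER_03_그리디/이코테/큰 수의 법칙/큰 수의 법칙_처음풀이.py | solution
-- ===== SOURCE A (Python) =====
-- def solution(n, m, k, li):  # n: 배열의 크기, m: 숫자가 더해지는 횟수, k: 연속 가능 횟수
--     li.sort(reverse=True)
--     answer = 0
--
--     while m:
--         for _ in range(k):
--             answer += li[0]
--             m -= 1
--
--             if not m:
--                 return answer
--
--         answer += li[1]
--         m -= 1
--     return answer
-- ===== SOURCE B (Python) =====
-- def solution(n, m, k, li):  # closed form: m//(k+1) full blocks of (k largest + second), remainder largest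
--     li.sort(reverse=True)
--     if m == 0:
--         return 0
--     q, r = divmod(m, k + 1)
--     ans = r * li[0]
--     if q:
--         ans += q * (k * li[0] + li[1])
--     return ans
-- ===== Notes on version B (the rewrite author's own statement) =====
-- stated objective: simpler
-- what changed: B replaces A's simulation loop (one iteration per addition) with the closed form built from divmod(m, k+1): full blocks contribute k*li[0]+li[1], the remainder li[0]; sorting is kept.
-- outside the precondition, e.g. on solution(2, 3, -1, [5, 2]): A returns 6, B raises ZeroDivisionError; on solution(2, -1, 2, [5, 2]): A does not finish within the time limit, B returns -2
import Mathlib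
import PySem

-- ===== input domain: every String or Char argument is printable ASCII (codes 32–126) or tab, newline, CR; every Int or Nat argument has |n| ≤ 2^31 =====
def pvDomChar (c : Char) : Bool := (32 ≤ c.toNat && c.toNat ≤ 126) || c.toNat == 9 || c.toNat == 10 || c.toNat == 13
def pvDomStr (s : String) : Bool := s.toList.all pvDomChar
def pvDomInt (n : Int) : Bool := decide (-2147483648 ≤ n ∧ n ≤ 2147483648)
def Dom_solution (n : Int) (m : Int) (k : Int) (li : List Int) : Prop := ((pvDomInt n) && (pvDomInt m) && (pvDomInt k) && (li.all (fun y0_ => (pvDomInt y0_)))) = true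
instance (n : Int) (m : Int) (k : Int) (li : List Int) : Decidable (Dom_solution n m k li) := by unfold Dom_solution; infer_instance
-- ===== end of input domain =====

-- B replaces A's one-addition-per-iteration loop with the divmod(m, k+1) closed form (objective: simpler).
-- Note: both A and B sort li in place (same mutation); the equivalence proved is about the return value.

-- ===== PORT A =====
-- inner 'for _ in range(k)': adds li[0], decrements m, early-returns (Sum.inl) when m hits 0
def solutionInner (a : Int) : Nat → Int → Int → (Int ⊕ (Int × Int))
  | 0, answer, m => Sum.inr (answer, m)
  | t+1, answer, m =>
    let answer := answer + a
    let m := m - 1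
    if m = 0 then Sum.inl answer else solutionInner a t answer m

-- outer 'while m': fuel m.toNat + 1 suffices on Pre_ (m ≥ 0: m strictly decreases each pass)
def solutionOuter (a b : Int) (k : Int) : Nat → Int → Int → Int
  | 0, answer, _ => answer
  | fuel+1, answer, m =>
    if m = 0 then answer
    else
      match solutionInner a k.toNat answer m with
      | Sum.inl r => r
      | Sum.inr (ans, m') => solutionOuter a b k fuel (ans + b) (m' - 1)

def solution (n : Int) (m : Int) (k : Int) (li : List Int) : Int :=
  let s := PySem.List.sorted li (fun x => x) true
  -- li[0] / li[1]: Pre_ guarantees the accesses A performs are in range (IndexError excluded)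
  let a := PySem.List.pyGetD s 0 0
  let b := PySem.List.pyGetD s 1 0
  solutionOuter a b k (m.toNat + 1) 0 m

-- ===== PORT B =====
def solution_alt (n : Int) (m : Int) (k : Int) (li : List Int) : Int :=
  let s := PySem.List.sorted li (fun x => x) true
  if m = 0 then 0
  else
    let q := PySem.Int.floordiv m (k + 1)
    let r := PySem.Int.mod m (k + 1)
    let ans := r * PySem.List.pyGetD s 0 0
    if q ≠ 0 then ans + q * (k * PySem.List.pyGetD s 0 0 + PySem.List.pyGetD s 1 0) else ans

-- ===== PRECONDITION & SPEC =====
-- Pre_ excludes: m < 0 (A loops forever), the indices A reads being out of range (IndexError),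
-- and k < 0, outside the natural domain of a "consecutive-use limit" (there A's empty range(k)
-- makes it return m*li[1], while B's divmod(m, k+1) raises or floors differently).
def Pre_solution (n : Int) (m : Int) (k : Int) (li : List Int) : Prop :=
  0 ≤ m ∧ 0 ≤ k ∧ (1 ≤ m → (if m ≤ k then 1 ≤ (li.length : Int) else 2 ≤ (li.length : Int)))
instance (n : Int) (m : Int) (k : Int) (li : List Int) : Decidable (Pre_solution n m k li) := by unfold Pre_solution; infer_instance
def pvWitness_solution : Int × Int × Int × List Int := (5, 8, 3, [2, 4, 5, 4, 6])

def Spec_solution (n : Int) (m : Int) (k : Int) (li : List Int) (out : Int) : Prop := out = solution_alt n m k li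
instance (n : Int) (m : Int) (k : Int) (li : List Int) (out : Int) : Decidable (Spec_solution n m k li out) := by unfold Spec_solution; infer_instance

-- ===== CLAIM (what is proved, stated in full; the proofs are below) =====
def Claim_equal_solution : Prop := ∀ (n : Int) (m : Int) (k : Int) (li : List Int), Dom_solution n m k li → Pre_solution n m k li → Spec_solution n m k li (solution n m k li)

-- ===== LEMMAS AND PROOFS =====

-- the inner for-loop: early return answer + M*a if m runs out within t steps, else (answer + t*a, m - t)
lemma inner_spec (a : Int) (t : Nat) (answer : Int) (M : Nat) (hM : 1 ≤ M) :
    solutionInner a t answer (M : Int) =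
      if M ≤ t then Sum.inl (answer + M * a) else Sum.inr (answer + t * a, (M : Int) - t) := by
  induction t generalizing answer M with
  | zero => simp [solutionInner]; omega
  | succ t ih =>
    rw [solutionInner]
    rcases Nat.eq_or_lt_of_le hM with h1 | h2
    · simp only [← h1]
      norm_num
    · have hne : (M : Int) - 1 ≠ 0 := by omega
      have hM1 : ((M - 1 : Nat) : Int) = (M : Int) - 1 := by omega
      simp only [hne, if_false]
      rw [← hM1, ih (answer + a) (M - 1) (by omega)]
      by_cases hle : M ≤ t + 1
      · have hTle : M - 1 ≤ t := by omega
        simp only [hTle, if_true, hle, if_true]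
        rw [hM1]; congr 1; ring
      · have h' : ¬ (M - 1 ≤ t) := by omega
        simp only [h', if_false, hle, if_false, Sum.inr.injEq, Prod.mk.injEq]
        rw [hM1]
        constructor
        · push_cast; ring
        · push_cast; ring

-- the outer while-loop computes the block closed form (fuel ≥ M; k = t ≥ 0)
lemma outer_spec (a b : Int) (t : Nat) (fuel : Nat) (answer : Int) (M : Nat)
    (hfuel : M ≤ fuel) :
    solutionOuter a b (t : Int) fuel answer (M : Int) =
      answer + ((M / (t + 1) : Nat) : Int) * (t * a + b) + ((M % (t + 1) : Nat) : Int) * a := by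
  induction fuel generalizing answer M with
  | zero =>
    have : M = 0 := by omega
    subst this
    simp [solutionOuter]
  | succ fuel ih =>
    rw [solutionOuter]
    by_cases h0 : M = 0
    · subst h0; simp
    · have hM1 : 1 ≤ M := by omega
      have hne : (M : Int) ≠ 0 := by omega
      simp only [hne, if_false]
      have htn : ((t : Int)).toNat = t := by simp
      rw [htn, inner_spec a t answer M hM1]
      by_cases hle : M ≤ t
      · -- early return: q = 0, r = M
        simp only [hle, if_true]
        have hq : M / (t + 1) = 0 := Nat.div_eq_of_lt (by omega)
        have hr : M % (t + 1) = M := Nat.mod_eq_of_lt (by omega)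
        rw [hq, hr]
        push_cast
        ring
      · -- full block, recurse on M - (t+1)
        simp only [hle, if_false]
        have hM' : ((M - (t + 1) : Nat) : Int) = (M : Int) - t - 1 := by omega
        rw [show (M : Int) - (t : Int) - 1 = ((M - (t + 1) : Nat) : Int) from hM'.symm]
        rw [ih (answer + t * a + b) (M - (t + 1)) (by omega)]
        have hMeq : M = (M - (t + 1)) + (t + 1) := by omega
        have hq : M / (t + 1) = (M - (t + 1)) / (t + 1) + 1 := by
          conv_lhs => rw [hMeq]
          exact Nat.add_div_right _ (by omega)
        have hr : M % (t + 1) = (M - (t + 1)) % (t + 1) := by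
          conv_lhs => rw [hMeq]
          exact Nat.add_mod_right _ _
        rw [hq, hr]
        push_cast
        ring

-- ===== VERDICT (by name: the statement is the Claim_ definition above) =====
theorem solution_spec : Claim_equal_solution := by
  intro n m k li _ hpre
  obtain ⟨hm, hk, _⟩ := hpre
  unfold Spec_solution solution solution_alt
  set s := PySem.List.sorted li (fun x => x) true with hs
  set a := PySem.List.pyGetD s 0 0 with ha
  set b := PySem.List.pyGetD s 1 0 with hb
  obtain ⟨M, hM⟩ : ∃ M : Nat, m = (M : Int) := ⟨m.toNat, by omega⟩
  obtain ⟨t, ht⟩ : ∃ t : Nat, k = (t : Int) := ⟨k.toNat, by omega⟩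
  subst hM ht
  have htn : ((M : Int)).toNat = M := by simp
  rw [htn]
  rw [outer_spec a b t (M + 1) 0 M (by omega)]
  by_cases h0 : (M : Int) = 0
  · have : M = 0 := by omega
    subst this; norm_num
  · simp only [h0, if_false]
    have hdiv : PySem.Int.floordiv (M : Int) ((t : Int) + 1) = ((M / (t + 1) : Nat) : Int) := by
      rw [show ((t : Int) + 1) = ((t + 1 : Nat) : Int) by push_cast; ring]
      exact PySem.Int.floordiv_natCast M (t + 1)
    have hmod : PySem.Int.mod (M : Int) ((t : Int) + 1) = ((M % (t + 1) : Nat) : Int) := by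
      rw [show ((t : Int) + 1) = ((t + 1 : Nat) : Int) by push_cast; ring]
      exact PySem.Int.mod_natCast M (t + 1)
    rw [hdiv, hmod]
    by_cases hq : ((M / (t + 1) : Nat) : Int) ≠ 0
    · rw [if_pos hq]; ring
    · rw [if_neg hq, not_not] at *
      rw [hq]; ring
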